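-- pv_equiv track=rewrite | github.com/jurijw/AdventOfCode2021 | day2.py | subtract_lists
-- ===== SOURCE A (Python) =====
-- def sum_list(lst):
--     """
--     Sum a list of numbers by recursively splitting the list in half.
--     :param lst: The list of numbers to be summed over
--     :return: The sum of the list of numbers.
--     """
--     if len(lst) == 0:
--         return 0
--     if len(lst) == 1:
--         return lst[0]
--     else:
--         split_index = len(lst) // 2
--         return sum_list(lst[:split_index]) + sum_list(lst[split_index:])
--
-- def subtract_lists(lst1, lst2):
--     """
--     Subtracts LST2 from LST1 elementwise, by recursively halving the lists and
--     comparing them, and returns the sum of this operation.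
--     :param lst1: A list from which is subtracted LST2
--     :param lst2: The list which is subtracted from LST1
--     :return:
--     """
--
--     if len(lst1) == 0:
--         return - sum_list(lst2)
--     if len(lst2) == 0:
--         return sum_list(lst1)
--     if len(lst1) == 1 and len(lst2) == 1:
--         return lst1[0] - lst2[0]
--     else:
--         split_index = len(lst1) // 2
--         return subtract_lists(lst1[:split_index], lst2[:split_index]) \
--                + subtract_lists(lst1[split_index:], lst2[split_index:])
-- ===== SOURCE B (Python) =====
-- def subtract_lists(lst1, lst2):
--     return sum(lst1) - sum(lst2)
-- ===== Notes on version B (the rewrite author's own statement) =====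
-- stated objective: faster
-- what changed: Replaced the divide-and-conquer recursion with slicing by a single closed-form pass sum(lst1) - sum(lst2).
import Mathlib
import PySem

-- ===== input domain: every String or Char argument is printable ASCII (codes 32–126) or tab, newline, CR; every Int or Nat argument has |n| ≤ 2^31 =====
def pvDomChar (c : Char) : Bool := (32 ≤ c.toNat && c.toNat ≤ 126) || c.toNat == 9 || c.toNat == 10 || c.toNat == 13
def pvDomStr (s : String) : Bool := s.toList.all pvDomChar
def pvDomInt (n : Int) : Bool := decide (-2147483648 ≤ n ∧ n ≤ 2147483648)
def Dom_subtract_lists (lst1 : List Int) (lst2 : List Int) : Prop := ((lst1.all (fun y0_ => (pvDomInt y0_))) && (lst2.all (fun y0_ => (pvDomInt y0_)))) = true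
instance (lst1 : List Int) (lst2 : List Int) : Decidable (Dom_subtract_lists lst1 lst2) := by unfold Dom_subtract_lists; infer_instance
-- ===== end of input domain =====

-- B replaces A's divide-and-conquer recursion by the closed one-pass form sum(lst1) - sum(lst2).
-- Equivalence is claimed on Pre_ (lst1 empty, or lst2 no longer than lst1): outside it A recurses forever (RecursionError).

-- ===== PORT A =====
-- sum_list: recursive halving sum (A's helper, step for step; slices via PySem.List.slice)
def sum_listA (lst : List Int) : Int :=
  if _h0 : lst.length = 0 then 0
  else if _h1 : lst.length = 1 then (PySem.List.pyGet? lst 0).getD 0   -- lst[0]; in range since length = 1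
  else
    sum_listA (PySem.List.slice lst none (some (Nat.cast (lst.length / 2))))
      + sum_listA (PySem.List.slice lst (some (Nat.cast (lst.length / 2))) none)
termination_by lst.length
decreasing_by
  · rw [PySem.List.slice_to_natCast]; simp; omega
  · rw [PySem.List.slice_from_natCast]; simp; omega

-- fuel makes A's (otherwise non-terminating) recursion total; lst1.length + 1 suffices on Pre_ (proved below)
def subtract_listsGo : Nat → List Int → List Int → Int
  | 0, _, _ => 0
  | fuel + 1, lst1, lst2 =>
    if lst1.length = 0 then - sum_listA lst2
    else if lst2.length = 0 then sum_listA lst1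
    else if lst1.length = 1 ∧ lst2.length = 1 then
      (PySem.List.pyGet? lst1 0).getD 0 - (PySem.List.pyGet? lst2 0).getD 0
    else
      subtract_listsGo fuel (PySem.List.slice lst1 none (some (Nat.cast (lst1.length / 2))))
          (PySem.List.slice lst2 none (some (Nat.cast (lst1.length / 2))))
        + subtract_listsGo fuel (PySem.List.slice lst1 (some (Nat.cast (lst1.length / 2))) none)
            (PySem.List.slice lst2 (some (Nat.cast (lst1.length / 2))) none)

def subtract_lists (lst1 : List Int) (lst2 : List Int) : Int :=
  subtract_listsGo (lst1.length + 1) lst1 lst2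

-- ===== PORT B =====
def subtract_lists_alt (lst1 : List Int) (lst2 : List Int) : Int :=
  lst1.sum - lst2.sum

-- ===== PRECONDITION & SPEC =====
-- Pre_ excludes exactly the inputs (lst1 non-empty and shorter than lst2) on which A never returns (RecursionError).
def Pre_subtract_lists (lst1 : List Int) (lst2 : List Int) : Prop :=
  lst1 = [] ∨ lst2.length ≤ lst1.length
instance (lst1 : List Int) (lst2 : List Int) : Decidable (Pre_subtract_lists lst1 lst2) := by
  unfold Pre_subtract_lists; infer_instance
def pvWitness_subtract_lists : List Int × List Int := ([1, 2, 3], [4, 5])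

def Spec_subtract_lists (lst1 : List Int) (lst2 : List Int) (out : Int) : Prop := out = subtract_lists_alt lst1 lst2
instance (lst1 : List Int) (lst2 : List Int) (out : Int) : Decidable (Spec_subtract_lists lst1 lst2 out) := by unfold Spec_subtract_lists; infer_instance

-- ===== CLAIM (what is proved, stated in full; the proofs are below) =====
def Claim_equal_subtract_lists : Prop := ∀ (lst1 : List Int) (lst2 : List Int), Dom_subtract_lists lst1 lst2 → Pre_subtract_lists lst1 lst2 → Spec_subtract_lists lst1 lst2 (subtract_lists lst1 lst2)

-- ===== LEMMAS AND PROOFS =====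

theorem sum_listA_eq (lst : List Int) : sum_listA lst = lst.sum := by
  induction lst using sum_listA.induct with
  | case1 lst h0 => simp [sum_listA, List.length_eq_zero_iff.mp h0]
  | case2 lst h0 h1 =>
    obtain ⟨x, hx⟩ := List.length_eq_one_iff.mp h1
    simp [sum_listA, hx, PySem.List.pyGet?, PySem.List.pyIdx?]
  | case3 lst h0 h1 ih1 ih2 =>
    rw [sum_listA]
    simp only [h0, h1, dite_false]
    rw [ih1, ih2, PySem.List.slice_to_natCast, PySem.List.slice_from_natCast]
    rw [← List.sum_append, List.take_append_drop]

theorem subtract_listsGo_eq (fuel : Nat) : ∀ (lst1 lst2 : List Int),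
    lst1.length < fuel → (lst1 = [] ∨ lst2.length ≤ lst1.length) →
    subtract_listsGo fuel lst1 lst2 = lst1.sum - lst2.sum := by
  induction fuel with
  | zero => intro lst1 lst2 h; omega
  | succ f ih =>
    intro lst1 lst2 hf hpre
    rw [subtract_listsGo]
    by_cases h0 : lst1.length = 0
    · simp [sum_listA_eq, List.length_eq_zero_iff.mp h0]
    · simp only [h0, if_false]
      have hle : lst2.length ≤ lst1.length := by
        rcases hpre with h | h
        · exact absurd (by simp [h]) h0
        · exact h
      by_cases h2 : lst2.length = 0
      · simp [sum_listA_eq, List.length_eq_zero_iff.mp h2]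
      · simp only [h2, if_false]
        by_cases h11 : lst1.length = 1 ∧ lst2.length = 1
        · obtain ⟨x, hx⟩ := List.length_eq_one_iff.mp h11.1
          obtain ⟨y, hy⟩ := List.length_eq_one_iff.mp h11.2
          simp [hx, hy, PySem.List.pyGet?, PySem.List.pyIdx?]
        · simp only [h11, if_false]
          have hlen1 : 2 ≤ lst1.length := by
            rcases Nat.lt_or_ge lst1.length 2 with h | h
            · exfalso; exact h11 ⟨by omega, by omega⟩
            · exact h
          set si : Nat := lst1.length / 2 with hsi
          have hsi1 : 1 ≤ si := by omega
          have hsilt : si < lst1.length := by omega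
          rw [PySem.List.slice_to_natCast, PySem.List.slice_to_natCast,
              PySem.List.slice_from_natCast, PySem.List.slice_from_natCast]
          rw [ih (lst1.take si) (lst2.take si) (by simp; omega)
                (Or.inr (by simp; omega)),
              ih (lst1.drop si) (lst2.drop si) (by simp; omega)
                (Or.inr (by simp; omega))]
          have e1 : (lst1.take si).sum + (lst1.drop si).sum = lst1.sum := by
            rw [← List.sum_append, List.take_append_drop]
          have e2 : (lst2.take si).sum + (lst2.drop si).sum = lst2.sum := by
            rw [← List.sum_append, List.take_append_drop]
          omega

-- ===== VERDICT (by name: the statement is the Claim_ definition above) =====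
theorem subtract_lists_spec : Claim_equal_subtract_lists := by
  intro lst1 lst2 _ hpre
  unfold Spec_subtract_lists subtract_lists subtract_lists_alt
  exact subtract_listsGo_eq (lst1.length + 1) lst1 lst2 (by omega) hpre
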